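-- pv_equiv track=rewrite | github.com/materialsproject/jobflow | src/jobflow/utils/find.py | get_root_locations
-- ===== SOURCE A (Python) =====
-- def get_root_locations(locations):
--     """Filter for the the lowest level locations.
--
--     If a parent location is in the list, the child location is removed
--
--     Parameters
--     ----------
--     locations : list[list]
--         A list of locations.
--
--     Returns
--     -------
--     list[list]
--         A list of locations with only the lowest level locations.
--
--     Example usage:
--         >>> _get_root_locations([["a", "b"], ["a"], ["c", "d"]])
--         [["a"], ["c", "d"]]
--     """
--     sorted_locs = sorted(locations, key=lambda x: len(x))
--     root_locations = []
--     for loc in sorted_locs: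
--         if any(loc[: len(rloc)] == rloc for rloc in root_locations):
--             continue
--         root_locations.append(loc)
--     return root_locations
-- ===== SOURCE B (Python) =====
-- def get_root_locations(locations):
--     roots = set()
--     out = []
--     for loc in sorted(locations, key=len):
--         t = tuple(loc)
--         if any(t[:k] in roots for k in range(len(t) + 1)):
--             continue
--         roots.add(t)
--         out.append(loc)
--     return out
-- ===== Notes on version B (the rewrite author's own statement) =====
-- stated objective: alternative
-- what changed: Instead of scanning every kept root for each location (O(n*roots*L)), B keeps the roots in a hash set and tests each location's own prefixes for membership (O(n*L^2)); measured cost on the generated inputs is similar.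
import Mathlib
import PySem

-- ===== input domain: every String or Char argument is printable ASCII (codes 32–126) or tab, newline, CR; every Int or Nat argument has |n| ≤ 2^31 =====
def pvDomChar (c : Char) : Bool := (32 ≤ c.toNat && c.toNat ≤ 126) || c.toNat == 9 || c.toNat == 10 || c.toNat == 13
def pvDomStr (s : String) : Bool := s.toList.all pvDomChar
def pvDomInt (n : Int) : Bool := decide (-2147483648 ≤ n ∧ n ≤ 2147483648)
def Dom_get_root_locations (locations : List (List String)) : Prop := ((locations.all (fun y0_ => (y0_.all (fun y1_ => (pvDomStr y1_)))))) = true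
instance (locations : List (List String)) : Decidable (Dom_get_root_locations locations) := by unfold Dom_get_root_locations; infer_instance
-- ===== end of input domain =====

-- B replaces A's inner scan over all kept roots by hash-set membership tests on the
-- location's own prefixes (objective: alternative algorithm, similar measured cost).

-- ===== PORT A =====
-- loc[: len(rloc)] has a nonnegative bound, so it is exactly List.take rloc.length.
def get_root_locations (locations : List (List String)) : List (List String) :=
  let sorted_locs := PySem.List.sorted locations (fun x => x.length) false
  sorted_locs.foldl
    (fun root_locations loc =>
      if root_locations.any (fun rloc => loc.take rloc.length == rloc) then
        root_locations
      else root_locations ++ [loc]) []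

-- ===== PORT B =====
-- roots is a Python set of tuples: PySem.Set (List String); tuple(loc) is loc itself under the
-- type convention (so t = loc is inlined); range(len(loc)+1) = List.range (loc.length+1).
def get_root_locations_alt (locations : List (List String)) : List (List String) :=
  ((PySem.List.sorted locations (fun x => x.length) false).foldl
    (fun (st : PySem.Set (List String) × List (List String)) loc =>
      if (List.range (loc.length + 1)).any (fun k => PySem.Set.contains st.1 (loc.take k)) then
        st
      else (PySem.Set.add st.1 loc, st.2 ++ [loc]))
    (PySem.Set.empty, [])).2

-- ===== PRECONDITION & SPEC =====
def Spec_get_root_locations (locations : List (List String)) (out : List (List String)) : Prop := out = get_root_locations_alt locations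
instance (locations : List (List String)) (out : List (List String)) : Decidable (Spec_get_root_locations locations out) := by unfold Spec_get_root_locations; infer_instance

-- ===== CLAIM (what is proved, stated in full; the proofs are below) =====
def Claim_equal_get_root_locations : Prop := ∀ (locations : List (List String)), Dom_get_root_locations locations → Spec_get_root_locations locations (get_root_locations locations)

-- ===== LEMMAS AND PROOFS =====

def pvStepA (root_locations : List (List String)) (loc : List String) : List (List String) :=
  if root_locations.any (fun rloc => loc.take rloc.length == rloc) then
    root_locations
  else root_locations ++ [loc]

def pvStepB (st : PySem.Set (List String) × List (List String)) (loc : List String) :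
    PySem.Set (List String) × List (List String) :=
  if (List.range (loc.length + 1)).any (fun k => PySem.Set.contains st.1 (loc.take k)) then
    st
  else (PySem.Set.add st.1 loc, st.2 ++ [loc])

-- When every element of acc is no longer than loc, A's condition ≡ B's condition.
lemma pv_cond_iff (acc : List (List String)) (loc : List String)
    (hlen : ∀ r ∈ acc, r.length ≤ loc.length) :
    (acc.any (fun rloc => loc.take rloc.length == rloc)) =
      ((List.range (loc.length + 1)).any (fun k => PySem.Set.contains acc (loc.take k))) := by
  apply Bool.eq_iff_iff.mpr
  simp only [List.any_eq_true, beq_iff_eq, PySem.Set.contains, List.contains_eq_mem,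
    List.mem_range, decide_eq_true_eq]
  constructor
  · rintro ⟨r, hr, hpref⟩
    exact ⟨r.length, by have := hlen r hr; omega, by rw [hpref]; exact hr⟩
  · rintro ⟨k, hk, hmem⟩
    refine ⟨loc.take k, hmem, ?_⟩
    rw [List.length_take]
    by_cases h : k ≤ loc.length
    · rw [min_eq_left h]
    · rw [min_eq_right (by omega), List.take_length, List.take_of_length_le (by omega)]

-- If A's condition fails, loc itself is not in acc, so Set.add appends.
lemma pv_add_eq (acc : List (List String)) (loc : List String)
    (h : (acc.any (fun rloc => loc.take rloc.length == rloc)) = false) :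
    PySem.Set.add acc loc = acc ++ [loc] := by
  simp only [List.any_eq_false, beq_iff_eq] at h
  simp only [PySem.Set.add, PySem.Set.contains, List.contains_eq_mem]
  rw [if_neg]
  simp only [decide_eq_true_eq]
  intro hmem
  exact h loc hmem (List.take_length)

-- Main loop invariant: B's state stays (a, a) where a is A's accumulator.
lemma pv_loop (s : List (List String)) (acc : List (List String))
    (hs : s.Pairwise (fun a b => a.length ≤ b.length))
    (hacc : ∀ r ∈ acc, ∀ x ∈ s, r.length ≤ x.length) :
    s.foldl pvStepB (acc, acc) = (s.foldl pvStepA acc, s.foldl pvStepA acc) := by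
  induction s generalizing acc with
  | nil => rfl
  | cons loc rest ih =>
    rw [List.pairwise_cons] at hs
    obtain ⟨hhead, htail⟩ := hs
    have hlen : ∀ r ∈ acc, r.length ≤ loc.length := fun r hr => hacc r hr loc (by simp)
    have hcond := pv_cond_iff acc loc hlen
    simp only [List.foldl_cons]
    cases hA : (acc.any (fun rloc => loc.take rloc.length == rloc)) with
    | true =>
      have hB : pvStepB (acc, acc) loc = (acc, acc) := by
        simp only [pvStepB, ← hcond, hA, if_true]
      have hA' : pvStepA acc loc = acc := by simp [pvStepA, hA]
      rw [hB, hA']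
      exact ih acc htail (fun r hr x hx => hacc r hr x (List.mem_cons_of_mem _ hx))
    | false =>
      have hB : pvStepB (acc, acc) loc = (acc ++ [loc], acc ++ [loc]) := by
        simp only [pvStepB, ← hcond, hA, Bool.false_eq_true, if_false]
        rw [pv_add_eq acc loc hA]
      have hA' : pvStepA acc loc = acc ++ [loc] := by simp [pvStepA, hA]
      rw [hB, hA']
      refine ih (acc ++ [loc]) htail (fun r hr x hx => ?_)
      rcases List.mem_append.1 hr with h | h
      · exact hacc r h x (List.mem_cons_of_mem _ hx)
      · simp only [List.mem_singleton] at h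
        subst h; exact hhead x hx

-- ===== VERDICT (by name: the statement is the Claim_ definition above) =====
theorem get_root_locations_spec : Claim_equal_get_root_locations := by
  intro locations _
  show get_root_locations locations = get_root_locations_alt locations
  show List.foldl pvStepA [] (PySem.List.sorted locations (fun x => x.length) false) =
    (List.foldl pvStepB (([] : List (List String)), [])
      (PySem.List.sorted locations (fun x => x.length) false)).2
  rw [pv_loop _ [] (PySem.List.sorted_pairwise locations (fun x => x.length))
    (by intro r hr; simp at hr)]
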